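-- pv_equiv track=rewrite | github.com/StFavn/PythonBasic_skillbox | Module14/07_years/main.py | chack_year
-- ===== SOURCE A (Python) =====
-- def chack_year(year, n):
--     if year == '':
--         return False
--     year_short = ''
--     for sample in year:
--         num = 0
--         for symbol in year:
--             if symbol == sample:
--                 num += 1
--             else:
--                 year_short += symbol
--             if num == n:
--                 return True
--         if chack_year(year_short, n):
--             return True
--         else:
--             return False
-- ===== SOURCE B (Python) =====
-- def chack_year(year, n):
--     # one-pass character count instead of recursive strip-and-rescan
--     if n < 1:
--         return False
--     counts = {}
--     for c in year:
--         counts[c] = counts.get(c, 0) + 1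
--     return any(v >= n for v in counts.values())
-- ===== Notes on version B (the rewrite author's own statement) =====
-- stated objective: faster
-- what changed: Replaces A's recursion that strips one character group per level and rescans the remainder (quadratic in the worst case) with a single counting pass building a dict of character counts followed by one scan of the counts, returning False up front for n < 1.
import Mathlib
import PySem

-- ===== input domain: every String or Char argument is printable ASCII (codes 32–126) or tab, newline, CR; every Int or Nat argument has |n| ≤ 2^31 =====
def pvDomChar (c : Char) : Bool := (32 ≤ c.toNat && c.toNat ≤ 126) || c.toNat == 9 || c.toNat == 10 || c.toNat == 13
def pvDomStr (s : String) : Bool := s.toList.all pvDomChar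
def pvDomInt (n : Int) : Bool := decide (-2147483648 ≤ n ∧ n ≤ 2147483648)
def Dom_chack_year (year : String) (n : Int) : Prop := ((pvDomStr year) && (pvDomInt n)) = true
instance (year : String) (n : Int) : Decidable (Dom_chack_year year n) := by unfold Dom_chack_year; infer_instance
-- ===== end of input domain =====

-- B replaces A's recursive strip-one-character-group-and-rescan with a single counting pass
-- (a dict of character counts) followed by one scan of the counts; equal return values are proved.

-- ===== PORT A =====
-- inner 'for symbol in year' loop: state (num, year_short), early return True when num == n
def pvInner (sample : Char) (n : Int) : List Char → Int → List Char → Bool × List Char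
  | [], _, ys => (false, ys)
  | symbol :: rest, num, ys =>
    let num' := if symbol == sample then num + 1 else num
    let ys' := if symbol == sample then ys else ys ++ [symbol]
    if num' = n then (true, ys') else pvInner sample n rest num' ys'

-- needed for termination of chack_yearCore (cited in decreasing_by)
theorem pvInner_snd_len (sample : Char) (n : Int) :
    ∀ (l : List Char) (num : Int) (ys : List Char),
      (pvInner sample n l num ys).2.length ≤ ys.length + (l.filter (fun c => !(c == sample))).length := by
  intro l
  induction l with
  | nil => intro num ys; simp [pvInner]
  | cons symbol rest ih =>
    intro num ys
    by_cases hs : (symbol == sample) = true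
    · have h1 := ih (num + 1) ys
      simp [pvInner, hs]
      split
      · simp
      · omega
    · have h1 := ih num (ys ++ [symbol])
      simp only [List.length_append, List.length_cons, List.length_nil] at h1
      simp [pvInner, hs]
      split <;> (try simp only [List.length_append, List.length_cons, List.length_nil]) <;> omega

-- Python's outer 'for sample in year' loop body returns on every path of its first iteration,
-- so only sample = year[0] runs; the '' check is the [] case.
def chack_yearCore (n : Int) : List Char → Bool
  | [] => false
  | sample :: rest =>
    let r := pvInner sample n (sample :: rest) 0 []
    if r.1 then true
    else if chack_yearCore n r.2 then true else false
termination_by l => l.length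
decreasing_by
  have h := pvInner_snd_len sample n (sample :: rest) 0 []
  have h2 : (List.filter (fun c => !(c == sample)) rest).length ≤ rest.length := List.length_filter_le _ _
  simp only [List.filter_cons, beq_self_eq_true, Bool.not_true, List.length_nil] at h
  simp at h
  simp
  omega

def chack_year (year : String) (n : Int) : Bool := chack_yearCore n year.toList

-- ===== PORT B =====
def chack_year_alt (year : String) (n : Int) : Bool :=
  if n < 1 then false
  else
    let counts := year.toList.foldl (fun d c => d.insert c (d.getD c 0 + 1)) PySem.Dict.empty
    counts.values.any (fun v => n ≤ v)

-- ===== PRECONDITION & SPEC =====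
def Spec_chack_year (year : String) (n : Int) (out : Bool) : Prop := out = chack_year_alt year n
instance (year : String) (n : Int) (out : Bool) : Decidable (Spec_chack_year year n out) := by unfold Spec_chack_year; infer_instance

-- ===== CLAIM (what is proved, stated in full; the proofs are below) =====
def Claim_equal_chack_year : Prop := ∀ (year : String) (n : Int), Dom_chack_year year n → Spec_chack_year year n (chack_year year n)

-- ===== LEMMAS AND PROOFS =====

-- once num has passed n the inner loop can never return True
theorem pvInner_gt (sample : Char) (n : Int) :
    ∀ (l : List Char) (num : Int) (ys : List Char), n < num →
      pvInner sample n l num ys = (false, ys ++ l.filter (fun c => !(c == sample))) := by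
  intro l
  induction l with
  | nil => intro num ys _; simp [pvInner]
  | cons symbol rest ih =>
    intro num ys h
    by_cases hs : (symbol == sample) = true
    · have hrec := ih (num + 1) ys (by omega)
      simp [pvInner, hs, show ¬ num + 1 = n from by omega, hrec]
    · have hrec := ih num (ys ++ [symbol]) h
      simp [pvInner, hs, show ¬ num = n from by omega, hrec]

-- while num < n: the inner loop returns True iff the occurrences of sample reach n,
-- and on False its accumulator is ys ++ the non-sample characters
theorem pvInner_lt (sample : Char) (n : Int) :
    ∀ (l : List Char) (num : Int) (ys : List Char), num < n →
      (pvInner sample n l num ys).1 = decide (n ≤ num + (l.count sample : Int)) ∧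
      ((pvInner sample n l num ys).1 = false →
        (pvInner sample n l num ys).2 = ys ++ l.filter (fun c => !(c == sample))) := by
  intro l
  induction l with
  | nil =>
    intro num ys h
    simp [pvInner]
    omega
  | cons symbol rest ih =>
    intro num ys h
    by_cases hs : (symbol == sample) = true
    · have hsym : symbol = sample := by simpa using hs
      by_cases he : num + 1 = n
      · simp [pvInner, he, hsym]
        omega
      · obtain ⟨h1, h2⟩ := ih (num + 1) ys (by omega)
        refine ⟨?_, ?_⟩
        · simp [pvInner, he, h1, hsym]
          constructor <;> (intro; omega)
        · intro hf
          simp only [pvInner, hs] at hf ⊢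
          simp only [if_true] at hf ⊢
          simp [he] at hf ⊢
          rw [h2 hf]
          simp [hs]
    · have hsym : ¬ symbol = sample := by simpa using hs
      obtain ⟨h1, h2⟩ := ih num (ys ++ [symbol]) h
      have hne : ¬ num = n := by omega
      refine ⟨?_, ?_⟩
      · simp [pvInner, hs, hne, h1, hsym]
      · intro hf
        simp only [pvInner, hs] at hf ⊢
        simp [hne] at hf ⊢
        rw [h2 hf]
        simp [hs]

-- dropping a character whose count is below n changes no verdict about 'some count reaches n'
theorem any_filter_count (n : Int) (l : List Char) (sample : Char)
    (hlt : ¬ n ≤ (l.count sample : Int)) :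
    ((l.filter (fun c => !(c == sample))).any
        (fun c => decide (n ≤ ((l.filter (fun c => !(c == sample))).count c : Int)))) =
      (l.any (fun c => decide (n ≤ (l.count c : Int)))) := by
  rw [Bool.eq_iff_iff]
  simp only [List.any_eq_true, decide_eq_true_eq]
  constructor
  · rintro ⟨c, hc, hn⟩
    have hcl : c ∈ l := List.mem_of_mem_filter hc
    have hcs : ¬ (c == sample) = true := by
      have := List.of_mem_filter hc; simpa using this
    have hcount : (l.filter (fun c => !(c == sample))).count c = l.count c :=
      List.count_filter (by simpa using hcs)
    exact ⟨c, hcl, by rwa [hcount] at hn⟩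
  · rintro ⟨c, hc, hn⟩
    have hcs : c ≠ sample := by rintro rfl; exact hlt hn
    refine ⟨c, List.mem_filter.2 ⟨hc, by simpa using hcs⟩, ?_⟩
    rw [List.count_filter (by simpa using hcs)]
    exact hn

theorem pvIteId (b : Bool) : (if b = true then true else false) = b := by cases b <;> simp

-- characterization of A: True iff 1 ≤ n and some character's count reaches n
theorem core_spec (n : Int) :
    ∀ (k : Nat) (l : List Char), l.length ≤ k →
      chack_yearCore n l = (decide (1 ≤ n) && l.any fun c => decide (n ≤ (l.count c : Int))) := by
  intro k
  induction k with
  | zero =>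
    intro l hl
    have : l = [] := List.length_eq_zero_iff.mp (Nat.le_zero.mp hl)
    subst this; simp [chack_yearCore]
  | succ k ih =>
    intro l hl
    match l with
    | [] => simp [chack_yearCore]
    | sample :: rest =>
      rw [chack_yearCore]
      by_cases hn : 1 ≤ n
      · obtain ⟨h1, h2⟩ := pvInner_lt sample n (sample :: rest) 0 [] (by omega)
        by_cases hc : n ≤ ((sample :: rest).count sample : Int)
        · have ht : (pvInner sample n (sample :: rest) 0 []).1 = true := by
            rw [h1]; simpa using hc
          have hany : (sample :: rest).any (fun c => decide (n ≤ ((sample :: rest).count c : Int))) = true := by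
            simp only [List.any_eq_true, decide_eq_true_eq]
            exact ⟨sample, by simp, hc⟩
          simp [ht, hany, hn]
        · have hf : (pvInner sample n (sample :: rest) 0 []).1 = false := by
            rw [h1]; simpa using hc
          have hsnd := h2 hf
          have hlen : ((sample :: rest).filter (fun c => !(c == sample))).length ≤ k := by
            have heq : ((sample :: rest).filter (fun c => !(c == sample))).length
                = (rest.filter (fun c => !(c == sample))).length := by
              simp
            have := List.length_filter_le (fun c => !(c == sample)) rest
            simp only [List.length_cons] at hl
            omega
          have hIH := ih _ hlen
          rw [any_filter_count n (sample :: rest) sample hc] at hIH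
          simp only [hf, Bool.false_eq_true, if_false, hsnd, List.nil_append, hIH, pvIteId]
      · -- n ≤ 0: the first inner step raises num to 1 > n, so the inner loop returns False
        have step : pvInner sample n (sample :: rest) 0 []
            = (false, rest.filter (fun c => !(c == sample))) := by
          have hrec := pvInner_gt sample n rest 1 [] (by omega)
          simp only [List.nil_append] at hrec
          simp [pvInner, show ¬ (1 : Int) = n from by omega, hrec]
        have hlen : (rest.filter (fun c => !(c == sample))).length ≤ k := by
          have := List.length_filter_le (fun c => !(c == sample)) rest
          simp only [List.length_cons] at hl
          omega
        have hIH := ih _ hlen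
        simp only [step, Bool.false_eq_true, if_false, hIH, pvIteId]
        simp [hn]

-- characterization of B via the counter dict
theorem alt_spec (year : String) (n : Int) :
    chack_year_alt year n = (decide (1 ≤ n) && year.toList.any fun c => decide (n ≤ (year.toList.count c : Int))) := by
  unfold chack_year_alt
  by_cases hn : n < 1
  · simp [hn, show ¬ 1 ≤ n from by omega]
  · rw [if_neg hn]
    rw [PySem.Dict.foldl_insert_getD_add_one_eq_counter]
    have hv : (PySem.Dict.counter year.toList).values
        = (PySem.Set.ofList year.toList).map (fun k => (year.toList.count k : Int)) := by
      simp only [PySem.Dict.values, PySem.Dict.items_counter, List.map_map]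
      rfl
    simp only [hv, List.any_map]
    have h1 : decide (1 ≤ n) = true := by simp; omega
    rw [h1, Bool.true_and]
    rw [Bool.eq_iff_iff]
    simp only [List.any_eq_true, Function.comp]
    constructor
    · rintro ⟨c, hc, h⟩
      exact ⟨c, (PySem.Set.mem_ofList _ _).mp hc, by simpa using h⟩
    · rintro ⟨c, hc, h⟩
      exact ⟨c, (PySem.Set.mem_ofList _ _).mpr hc, by simpa using h⟩

-- ===== VERDICT (by name: the statement is the Claim_ definition above) =====
theorem chack_year_spec : Claim_equal_chack_year := by
  intro year n _
  unfold Spec_chack_year chack_year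
  rw [core_spec n year.toList.length year.toList le_rfl, alt_spec]
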